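-- pv_equiv track=rewrite | github.com/hgfgdsy/python_analysis | dealdep.py | get_tool_dic
-- ===== SOURCE A (Python) =====
-- def get_tool_dic(tool_list):
--     dic = {1: '', 2: '', 3: '', 4: '', 5: '', 6: '', 7: '', 8: '', 9: ''}
--     for t in tool_list:
--         t = t[1:]
--         if t == 'Gopkg.lock':
--             dic[1] = t
--
--         if t == 'glide.lock':
--             dic[2] = t
--
--         if t == 'Godeps/Godeps.json':
--             dic[3] = t
--
--         if t == 'GLOCKFILE':
--             dic[4] = t
--
--         if t == 'dependencies.tsv':
--             dic[5] = t
--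
--         if t == 'vendor.conf':
--             dic[6] = t
--
--         if t == 'vendor.yml':
--             dic[7] = t
--
--         if t == 'vendor/vendor.json':
--             dic[8] = t
--
--         if t == 'vendor/vendor.manifest':
--             dic[9] = t
--
--     return dic
-- ===== SOURCE B (Python) =====
-- _SLOT_NAMES = {
--     1: 'Gopkg.lock',
--     2: 'glide.lock',
--     3: 'Godeps/Godeps.json',
--     4: 'GLOCKFILE',
--     5: 'dependencies.tsv',
--     6: 'vendor.conf',
--     7: 'vendor.yml',
--     8: 'vendor/vendor.json',
--     9: 'vendor/vendor.manifest',
-- }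
--
--
-- def get_tool_dic(tool_list):
--     present = {t[1:] for t in tool_list}
--     return {slot: (name if name in present else '')
--             for slot, name in _SLOT_NAMES.items()}
-- ===== Notes on version B (the rewrite author's own statement) =====
-- stated objective: idiomatic
-- what changed: Instead of scanning the input with nine equality branches per element that overwrite dict slots, B builds the set of stripped names once and produces the dict by a comprehension over the fixed slot-to-filename mapping, testing set membership.
import Mathlib
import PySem

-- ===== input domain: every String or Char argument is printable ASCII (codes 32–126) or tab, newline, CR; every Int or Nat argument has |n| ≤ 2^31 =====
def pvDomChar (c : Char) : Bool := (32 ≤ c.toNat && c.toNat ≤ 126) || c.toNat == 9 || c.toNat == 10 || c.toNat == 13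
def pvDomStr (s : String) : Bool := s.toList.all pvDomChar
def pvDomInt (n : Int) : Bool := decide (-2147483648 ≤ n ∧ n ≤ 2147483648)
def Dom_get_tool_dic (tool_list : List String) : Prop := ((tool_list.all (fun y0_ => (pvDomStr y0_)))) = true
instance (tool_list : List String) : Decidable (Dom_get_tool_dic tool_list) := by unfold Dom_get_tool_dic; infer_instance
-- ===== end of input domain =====

-- B replaces A's per-element nine-branch overwrite loop by one pass building the set of
-- stripped names and a map over the fixed slot→filename table (idiomatic; same cost class).

-- ===== PORT A =====
-- t[1:]
def pvStrip (t : String) : String := PySem.Str.slice t (some 1) none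

-- the nine sequential 'if t == …: dic[k] = t' statements of A's loop body, after 't = t[1:]'
def pvStepBody (d : PySem.Dict Int String) (t : String) : PySem.Dict Int String :=
  let d := if t = "Gopkg.lock" then d.insert 1 t else d
  let d := if t = "glide.lock" then d.insert 2 t else d
  let d := if t = "Godeps/Godeps.json" then d.insert 3 t else d
  let d := if t = "GLOCKFILE" then d.insert 4 t else d
  let d := if t = "dependencies.tsv" then d.insert 5 t else d
  let d := if t = "vendor.conf" then d.insert 6 t else d
  let d := if t = "vendor.yml" then d.insert 7 t else d
  let d := if t = "vendor/vendor.json" then d.insert 8 t else d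
  let d := if t = "vendor/vendor.manifest" then d.insert 9 t else d
  d

def pvStepA (d : PySem.Dict Int String) (t : String) : PySem.Dict Int String :=
  pvStepBody d (pvStrip t)

def get_tool_dic (tool_list : List String) : List (Int × String) :=
  (tool_list.foldl pvStepA
    (PySem.Dict.ofList [(1, ""), (2, ""), (3, ""), (4, ""), (5, ""), (6, ""), (7, ""), (8, ""), (9, "")])).items

-- ===== PORT B =====
-- the module-level _SLOT_NAMES dict
def pvSlotNames : PySem.Dict Int String :=
  PySem.Dict.ofList [(1, "Gopkg.lock"), (2, "glide.lock"), (3, "Godeps/Godeps.json"),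
    (4, "GLOCKFILE"), (5, "dependencies.tsv"), (6, "vendor.conf"), (7, "vendor.yml"),
    (8, "vendor/vendor.json"), (9, "vendor/vendor.manifest")]

def get_tool_dic_alt (tool_list : List String) : List (Int × String) :=
  let present : PySem.Set String := PySem.Set.ofList (tool_list.map (fun t => pvStrip t))
  pvSlotNames.items.map (fun p => (p.1, if PySem.Set.contains present p.2 then p.2 else ""))

-- ===== PRECONDITION & SPEC =====
def Spec_get_tool_dic (tool_list : List String) (out : List (Int × String)) : Prop := out = get_tool_dic_alt tool_list
instance (tool_list : List String) (out : List (Int × String)) : Decidable (Spec_get_tool_dic tool_list out) := by unfold Spec_get_tool_dic; infer_instance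

-- ===== CLAIM (what is proved, stated in full; the proofs are below) =====
def Claim_equal_get_tool_dic : Prop := ∀ (tool_list : List String), Dom_get_tool_dic tool_list → Spec_get_tool_dic tool_list (get_tool_dic tool_list)

-- ===== LEMMAS AND PROOFS =====
-- the shape A's dict keeps throughout the loop: all nine keys, in order
def pvMk9 (v1 v2 v3 v4 v5 v6 v7 v8 v9 : String) : PySem.Dict Int String :=
  PySem.Dict.mk [(1, v1), (2, v2), (3, v3), (4, v4), (5, v5), (6, v6), (7, v7), (8, v8), (9, v9)]

theorem pvIns1 (w1 w2 w3 w4 w5 w6 w7 w8 w9 t : String) :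
    (if t = "Gopkg.lock" then (pvMk9 w1 w2 w3 w4 w5 w6 w7 w8 w9).insert 1 t
     else pvMk9 w1 w2 w3 w4 w5 w6 w7 w8 w9) =
    pvMk9 (if t = "Gopkg.lock" then "Gopkg.lock" else w1) w2 w3 w4 w5 w6 w7 w8 w9 := by
  split_ifs with h
  · subst h; rfl
  · rfl

theorem pvIns2 (w1 w2 w3 w4 w5 w6 w7 w8 w9 t : String) :
    (if t = "glide.lock" then (pvMk9 w1 w2 w3 w4 w5 w6 w7 w8 w9).insert 2 t
     else pvMk9 w1 w2 w3 w4 w5 w6 w7 w8 w9) =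
    pvMk9 w1 (if t = "glide.lock" then "glide.lock" else w2) w3 w4 w5 w6 w7 w8 w9 := by
  split_ifs with h
  · subst h; rfl
  · rfl

theorem pvIns3 (w1 w2 w3 w4 w5 w6 w7 w8 w9 t : String) :
    (if t = "Godeps/Godeps.json" then (pvMk9 w1 w2 w3 w4 w5 w6 w7 w8 w9).insert 3 t
     else pvMk9 w1 w2 w3 w4 w5 w6 w7 w8 w9) =
    pvMk9 w1 w2 (if t = "Godeps/Godeps.json" then "Godeps/Godeps.json" else w3) w4 w5 w6 w7 w8 w9 := by
  split_ifs with h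
  · subst h; rfl
  · rfl

theorem pvIns4 (w1 w2 w3 w4 w5 w6 w7 w8 w9 t : String) :
    (if t = "GLOCKFILE" then (pvMk9 w1 w2 w3 w4 w5 w6 w7 w8 w9).insert 4 t
     else pvMk9 w1 w2 w3 w4 w5 w6 w7 w8 w9) =
    pvMk9 w1 w2 w3 (if t = "GLOCKFILE" then "GLOCKFILE" else w4) w5 w6 w7 w8 w9 := by
  split_ifs with h
  · subst h; rfl
  · rfl

theorem pvIns5 (w1 w2 w3 w4 w5 w6 w7 w8 w9 t : String) :
    (if t = "dependencies.tsv" then (pvMk9 w1 w2 w3 w4 w5 w6 w7 w8 w9).insert 5 t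
     else pvMk9 w1 w2 w3 w4 w5 w6 w7 w8 w9) =
    pvMk9 w1 w2 w3 w4 (if t = "dependencies.tsv" then "dependencies.tsv" else w5) w6 w7 w8 w9 := by
  split_ifs with h
  · subst h; rfl
  · rfl

theorem pvIns6 (w1 w2 w3 w4 w5 w6 w7 w8 w9 t : String) :
    (if t = "vendor.conf" then (pvMk9 w1 w2 w3 w4 w5 w6 w7 w8 w9).insert 6 t
     else pvMk9 w1 w2 w3 w4 w5 w6 w7 w8 w9) =
    pvMk9 w1 w2 w3 w4 w5 (if t = "vendor.conf" then "vendor.conf" else w6) w7 w8 w9 := by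
  split_ifs with h
  · subst h; rfl
  · rfl

theorem pvIns7 (w1 w2 w3 w4 w5 w6 w7 w8 w9 t : String) :
    (if t = "vendor.yml" then (pvMk9 w1 w2 w3 w4 w5 w6 w7 w8 w9).insert 7 t
     else pvMk9 w1 w2 w3 w4 w5 w6 w7 w8 w9) =
    pvMk9 w1 w2 w3 w4 w5 w6 (if t = "vendor.yml" then "vendor.yml" else w7) w8 w9 := by
  split_ifs with h
  · subst h; rfl
  · rfl

theorem pvIns8 (w1 w2 w3 w4 w5 w6 w7 w8 w9 t : String) :
    (if t = "vendor/vendor.json" then (pvMk9 w1 w2 w3 w4 w5 w6 w7 w8 w9).insert 8 t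
     else pvMk9 w1 w2 w3 w4 w5 w6 w7 w8 w9) =
    pvMk9 w1 w2 w3 w4 w5 w6 w7 (if t = "vendor/vendor.json" then "vendor/vendor.json" else w8) w9 := by
  split_ifs with h
  · subst h; rfl
  · rfl

theorem pvIns9 (w1 w2 w3 w4 w5 w6 w7 w8 w9 t : String) :
    (if t = "vendor/vendor.manifest" then (pvMk9 w1 w2 w3 w4 w5 w6 w7 w8 w9).insert 9 t
     else pvMk9 w1 w2 w3 w4 w5 w6 w7 w8 w9) =
    pvMk9 w1 w2 w3 w4 w5 w6 w7 w8 (if t = "vendor/vendor.manifest" then "vendor/vendor.manifest" else w9) := by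
  split_ifs with h
  · subst h; rfl
  · rfl


theorem pvStepBody_mk9 (v1 v2 v3 v4 v5 v6 v7 v8 v9 : String) (t : String) :
    pvStepBody (pvMk9 v1 v2 v3 v4 v5 v6 v7 v8 v9) t =
    pvMk9 (if t = "Gopkg.lock" then "Gopkg.lock" else v1)
          (if t = "glide.lock" then "glide.lock" else v2)
          (if t = "Godeps/Godeps.json" then "Godeps/Godeps.json" else v3)
          (if t = "GLOCKFILE" then "GLOCKFILE" else v4)
          (if t = "dependencies.tsv" then "dependencies.tsv" else v5)
          (if t = "vendor.conf" then "vendor.conf" else v6)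
          (if t = "vendor.yml" then "vendor.yml" else v7)
          (if t = "vendor/vendor.json" then "vendor/vendor.json" else v8)
          (if t = "vendor/vendor.manifest" then "vendor/vendor.manifest" else v9) := by
  simp only [pvStepBody, pvIns1, pvIns2, pvIns3, pvIns4, pvIns5, pvIns6, pvIns7, pvIns8, pvIns9]

theorem pvCombine (t n v : String) (q : Bool) :
    (if q = true then n else if pvStrip t = n then n else v) =
    (if (pvStrip t == n || q) = true then n else v) := by
  by_cases h : pvStrip t = n <;> cases q <;> simp [h]

theorem pvFoldA (ts : List String) (v1 v2 v3 v4 v5 v6 v7 v8 v9 : String) :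
    ts.foldl pvStepA (pvMk9 v1 v2 v3 v4 v5 v6 v7 v8 v9) =
    pvMk9 (if ts.any (fun t => pvStrip t == "Gopkg.lock") then "Gopkg.lock" else v1)
          (if ts.any (fun t => pvStrip t == "glide.lock") then "glide.lock" else v2)
          (if ts.any (fun t => pvStrip t == "Godeps/Godeps.json") then "Godeps/Godeps.json" else v3)
          (if ts.any (fun t => pvStrip t == "GLOCKFILE") then "GLOCKFILE" else v4)
          (if ts.any (fun t => pvStrip t == "dependencies.tsv") then "dependencies.tsv" else v5)
          (if ts.any (fun t => pvStrip t == "vendor.conf") then "vendor.conf" else v6)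
          (if ts.any (fun t => pvStrip t == "vendor.yml") then "vendor.yml" else v7)
          (if ts.any (fun t => pvStrip t == "vendor/vendor.json") then "vendor/vendor.json" else v8)
          (if ts.any (fun t => pvStrip t == "vendor/vendor.manifest") then "vendor/vendor.manifest" else v9) := by
  induction ts generalizing v1 v2 v3 v4 v5 v6 v7 v8 v9 with
  | nil => simp
  | cons t ts ih =>
    rw [List.foldl_cons, show pvStepA (pvMk9 v1 v2 v3 v4 v5 v6 v7 v8 v9) t =
        pvStepBody (pvMk9 v1 v2 v3 v4 v5 v6 v7 v8 v9) (pvStrip t) from rfl,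
      pvStepBody_mk9, ih]
    simp only [List.any_cons, pvCombine]
    rfl

theorem pvContains_present (l : List String) (n : String) :
    PySem.Set.contains (PySem.Set.ofList (l.map (fun t => pvStrip t))) n =
    l.any (fun t => pvStrip t == n) := by
  rcases h : l.any (fun t => pvStrip t == n) with _ | _
  · simp only [List.any_eq_false, beq_iff_eq] at h
    have : n ∉ PySem.Set.ofList (l.map (fun t => pvStrip t)) := by
      rw [PySem.Set.mem_ofList]
      simp only [List.mem_map, not_exists, not_and]
      intro t ht he
      exact h t ht he
    simpa using this
  · simp only [List.any_eq_true, beq_iff_eq] at h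
    obtain ⟨t, ht, he⟩ := h
    have : n ∈ PySem.Set.ofList (l.map (fun t => pvStrip t)) := by
      rw [PySem.Set.mem_ofList]
      exact List.mem_map.mpr ⟨t, ht, he⟩
    simpa using this

-- ===== VERDICT (by name: the statement is the Claim_ definition above) =====
theorem get_tool_dic_spec : Claim_equal_get_tool_dic := by
  intro tool_list _
  unfold Spec_get_tool_dic get_tool_dic get_tool_dic_alt
  rw [show PySem.Dict.ofList [((1:Int), ""), (2, ""), (3, ""), (4, ""), (5, ""), (6, ""), (7, ""),
      (8, ""), (9, "")] = pvMk9 "" "" "" "" "" "" "" "" "" from rfl, pvFoldA]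
  simp only [pvSlotNames, pvMk9, PySem.Dict.ofList, pvContains_present]
  rfl
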